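-- pv_equiv track=rewrite | github.com/Sprutocean/Smarto | toolkit/bytecode.py | detect_dangerous_opcodes
-- ===== SOURCE A (Python) =====
-- from typing import Dict, List, Tuple, Any, Set
--
-- def detect_dangerous_opcodes(instructions: List[str]) -> Dict[str, List[int]]:
--     """
--     Detect potentially dangerous opcodes in the bytecode instructions.
--
--     Args:
--         instructions: List of disassembled instructions
--
--     Returns:
--         Dict mapping dangerous opcode to list of instruction indexes where it appears
--     """
--     dangerous_opcodes = {
--         'DELEGATECALL': [],
--         'SELFDESTRUCT': [],
--         'TX.ORIGIN': []
--     }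
--
--     for idx, instr in enumerate(instructions):
--         for opcode in dangerous_opcodes.keys():
--             if opcode in instr.upper():
--                 dangerous_opcodes[opcode].append(idx)
--
--     return dangerous_opcodes
-- ===== SOURCE B (Python) =====
-- def detect_dangerous_opcodes(instructions):
--     """
--     Detect potentially dangerous opcodes in the bytecode instructions.
--
--     Instead of three independent built-in substring tests per line, each
--     instruction is scanned ONCE position by position: at every start position
--     we check which of the still-unfound dangerous opcodes begins there
--     (str.startswith with an offset), remove the matches from the pending set
--     and stop early as soon as nothing is pending.  A simultaneous
--     multi-pattern scan rather than repeated `in` searches.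
--     """
--     names = ('DELEGATECALL', 'SELFDESTRUCT', 'TX.ORIGIN')
--     result = {name: [] for name in names}
--     for idx, instr in enumerate(instructions):
--         u = instr.upper()
--         remaining = list(names)
--         found = []
--         j = 0
--         while remaining and j < len(u):
--             found += [p for p in remaining if u.startswith(p, j)]
--             remaining = [p for p in remaining if not u.startswith(p, j)]
--             j += 1
--         for name in found:
--             result[name].append(idx)
--     return result
-- ===== Notes on version B (the rewrite author's own statement) =====
-- stated objective: alternative
-- what changed: B replaces A's three built-in substring tests per instruction by one simultaneous multi-pattern scan of each uppercased instruction: a while loop over start positions that checks with str.startswith(p, j) which still-pending opcodes begin at that position, removes matches from the pending list, and exits early once all are found.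
import Mathlib
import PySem

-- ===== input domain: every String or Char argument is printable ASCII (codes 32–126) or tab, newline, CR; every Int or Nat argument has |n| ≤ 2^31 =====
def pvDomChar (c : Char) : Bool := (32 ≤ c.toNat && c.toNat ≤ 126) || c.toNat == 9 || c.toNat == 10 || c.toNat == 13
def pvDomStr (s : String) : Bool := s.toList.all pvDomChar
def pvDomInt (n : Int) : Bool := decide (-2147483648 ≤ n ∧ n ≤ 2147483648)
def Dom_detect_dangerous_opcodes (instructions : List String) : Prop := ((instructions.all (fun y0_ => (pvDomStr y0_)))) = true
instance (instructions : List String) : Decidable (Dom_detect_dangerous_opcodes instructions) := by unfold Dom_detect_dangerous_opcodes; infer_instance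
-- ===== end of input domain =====

-- B replaces A's three per-line built-in substring tests by one simultaneous multi-pattern
-- position scan of each uppercased instruction, with early exit once all opcodes are found (alternative).

-- ===== PORT A =====
-- A's loop body: for each key of the current dict, append idx to that key's list
-- if the opcode occurs in instr.upper().  (The keys of the dict never change, and
-- in Python mutating values does not disturb the keys() view being iterated.)
def detect_dangerous_opcodes (instructions : List String) : List (String × List Int) :=
  let init : PySem.Dict String (List Int) :=
    PySem.Dict.ofList [("DELEGATECALL", []), ("SELFDESTRUCT", []), ("TX.ORIGIN", [])]
  ((PySem.List.enumerate instructions 0).foldl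
    (fun d p =>
      d.keys.foldl
        (fun d' opcode =>
          if PySem.Str.isIn opcode (PySem.Str.upper p.2)
          then d'.modify opcode [] (· ++ [p.1]) else d') d)
    init).items

-- ===== PORT B =====
-- B's while loop: positions j = 0,1,…,len(u)-1 with early exit when `remaining` is empty.
-- Each iteration: found += [p for p in remaining if u.startswith(p, j)];
--                 remaining = [p for p in remaining if not u.startswith(p, j)].
-- Python's u.startswith(p, j) with 0 ≤ j is exactly: p is a prefix of u[j:], i.e.
-- Chars.startswith (u.drop j) p.toList (exact on all inputs).
def pvScanB (u : List Char) : List Nat → List String → List String → List String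
  | [], _, found => found
  | j :: rest, remaining, found =>
    if remaining = [] then found
    else pvScanB u rest
        (remaining.filter (fun p => !PySem.Chars.startswith (u.drop j) p.toList))
        (found ++ remaining.filter (fun p => PySem.Chars.startswith (u.drop j) p.toList))

def detect_dangerous_opcodes_alt (instructions : List String) : List (String × List Int) :=
  let names : List String := ["DELEGATECALL", "SELFDESTRUCT", "TX.ORIGIN"]
  let init : PySem.Dict String (List Int) :=
    PySem.Dict.ofList (names.map (fun n => (n, [])))
  ((PySem.List.enumerate instructions 0).foldl
    (fun d p =>
      let u := (PySem.Str.upper p.2).toList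
      let found := pvScanB u (List.range u.length) names []
      found.foldl (fun d' name => d'.modify name [] (· ++ [p.1])) d)
    init).items

-- ===== PRECONDITION & SPEC =====
def Spec_detect_dangerous_opcodes (instructions : List String) (out : List (String × List Int)) : Prop := out = detect_dangerous_opcodes_alt instructions
instance (instructions : List String) (out : List (String × List Int)) : Decidable (Spec_detect_dangerous_opcodes instructions out) := by unfold Spec_detect_dangerous_opcodes; infer_instance

-- ===== CLAIM (what is proved, stated in full; the proofs are below) =====
def Claim_equal_detect_dangerous_opcodes : Prop := ∀ (instructions : List String), Dom_detect_dangerous_opcodes instructions → Spec_detect_dangerous_opcodes instructions (detect_dangerous_opcodes instructions)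

-- ===== LEMMAS AND PROOFS =====

-- abbreviation used only by the proofs below
def pvHits (opcode : String) (ps : List (Int × String)) : List Int :=
  ps.filterMap (fun p => if PySem.Str.isIn opcode (PySem.Str.upper p.2) then some p.1 else none)

-- one iteration of A's outer loop on a dict with exactly the three dangerous keys
theorem pvStep (p : Int × String) (a b c : List Int) :
    ((PySem.Dict.mk [("DELEGATECALL", a), ("SELFDESTRUCT", b), ("TX.ORIGIN", c)]).keys.foldl
      (fun d' opcode =>
        if PySem.Str.isIn opcode (PySem.Str.upper p.2)
        then d'.modify opcode [] (· ++ [p.1]) else d')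
      (PySem.Dict.mk [("DELEGATECALL", a), ("SELFDESTRUCT", b), ("TX.ORIGIN", c)]))
    = PySem.Dict.mk
        [("DELEGATECALL", if PySem.Str.isIn "DELEGATECALL" (PySem.Str.upper p.2) then a ++ [p.1] else a),
         ("SELFDESTRUCT", if PySem.Str.isIn "SELFDESTRUCT" (PySem.Str.upper p.2) then b ++ [p.1] else b),
         ("TX.ORIGIN", if PySem.Str.isIn "TX.ORIGIN" (PySem.Str.upper p.2) then c ++ [p.1] else c)] := by
  rcases Bool.eq_false_or_eq_true (PySem.Str.isIn "DELEGATECALL" (PySem.Str.upper p.2)) with h1 | h1 <;>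
  rcases Bool.eq_false_or_eq_true (PySem.Str.isIn "SELFDESTRUCT" (PySem.Str.upper p.2)) with h2 | h2 <;>
  rcases Bool.eq_false_or_eq_true (PySem.Str.isIn "TX.ORIGIN" (PySem.Str.upper p.2)) with h3 | h3 <;>
    simp only [PySem.Dict.keys, List.map, List.foldl, h1, h2, h3, reduceIte] <;> rfl

-- the invariant of A's outer loop
theorem pvLoopA (ps : List (Int × String)) :
    ∀ (a b c : List Int),
      ((ps.foldl
        (fun d p =>
          d.keys.foldl
            (fun d' opcode =>
              if PySem.Str.isIn opcode (PySem.Str.upper p.2)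
              then d'.modify opcode [] (· ++ [p.1]) else d') d)
        (PySem.Dict.mk [("DELEGATECALL", a), ("SELFDESTRUCT", b), ("TX.ORIGIN", c)])).items)
      = [("DELEGATECALL", a ++ pvHits "DELEGATECALL" ps),
         ("SELFDESTRUCT", b ++ pvHits "SELFDESTRUCT" ps),
         ("TX.ORIGIN", c ++ pvHits "TX.ORIGIN" ps)] := by
  induction ps with
  | nil => intro a b c; simp [pvHits]
  | cons p ps ih =>
      intro a b c
      rw [List.foldl_cons, pvStep, ih]
      rcases Bool.eq_false_or_eq_true (PySem.Str.isIn "DELEGATECALL" (PySem.Str.upper p.2)) with h1 | h1 <;>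
      rcases Bool.eq_false_or_eq_true (PySem.Str.isIn "SELFDESTRUCT" (PySem.Str.upper p.2)) with h2 | h2 <;>
      rcases Bool.eq_false_or_eq_true (PySem.Str.isIn "TX.ORIGIN" (PySem.Str.upper p.2)) with h3 | h3 <;>
        simp only [pvHits, List.filterMap_cons, h1, h2, h3] <;>
        simp [List.append_assoc]

-- membership in the result of B's multi-pattern scan
theorem pvScan_mem (u : List Char) (q : String) :
    ∀ (pos : List Nat) (remaining found : List String),
      q ∈ pvScanB u pos remaining found ↔
        q ∈ found ∨ (q ∈ remaining ∧ ∃ j ∈ pos, PySem.Chars.startswith (u.drop j) q.toList = true) := by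
  intro pos
  induction pos with
  | nil => intro remaining found; simp [pvScanB]
  | cons j rest ih =>
      intro remaining found
      by_cases hrem : remaining = []
      · simp [pvScanB, hrem]
      · rw [pvScanB]
        simp only [hrem, if_false, ih, List.mem_append, List.mem_filter]
        constructor
        · rintro ((h | ⟨hq2, hsw⟩) | ⟨⟨hq2, -⟩, j', hj', hsw'⟩)
          · exact Or.inl h
          · exact Or.inr ⟨hq2, j, List.mem_cons_self, hsw⟩
          · exact Or.inr ⟨hq2, j', List.mem_cons_of_mem _ hj', hsw'⟩
        · rintro (h | ⟨hq2, j', hj', hsw'⟩)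
          · exact Or.inl (Or.inl h)
          · rcases List.mem_cons.mp hj' with rfl | hj''
            · exact Or.inl (Or.inr ⟨hq2, hsw'⟩)
            · by_cases hsw : PySem.Chars.startswith (u.drop j) q.toList = true
              · exact Or.inl (Or.inr ⟨hq2, hsw⟩)
              · exact Or.inr ⟨⟨hq2, by simp [hsw]⟩, j', hj'', hsw'⟩

-- the scan result stays duplicate-free and inside found ++ remaining
theorem pvScan_nodup_sub (u : List Char) :
    ∀ (pos : List Nat) (remaining found : List String),
      (found ++ remaining).Nodup →
      (pvScanB u pos remaining found).Nodup ∧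
        ∀ q ∈ pvScanB u pos remaining found, q ∈ found ++ remaining := by
  intro pos
  induction pos with
  | nil =>
      intro remaining found h
      exact ⟨(List.nodup_append.mp h).1, fun q hq => List.mem_append_left _ hq⟩
  | cons j rest ih =>
      intro remaining found h
      by_cases hrem : remaining = []
      · rw [pvScanB]
        simp only [hrem, if_true]
        exact ⟨(List.nodup_append.mp h).1, fun q hq => List.mem_append_left _ hq⟩
      · rw [pvScanB]
        simp only [hrem, if_false]
        have hperm :
            ((found ++ remaining.filter (fun p => PySem.Chars.startswith (u.drop j) p.toList)) ++
              remaining.filter (fun p => !PySem.Chars.startswith (u.drop j) p.toList)).Perm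
              (found ++ remaining) := by
          rw [List.append_assoc]
          exact List.Perm.append_left found (List.filter_append_perm _ remaining)
        have h' := (hperm.nodup_iff).mpr h
        obtain ⟨hn, hs⟩ := ih _ _ h'
        exact ⟨hn, fun q hq => hperm.mem_iff.mp (hs q hq)⟩

-- B's detection agrees with Python's `opcode in u` for each nonempty pattern
theorem pvFound_iff (u : List Char) (q : String)
    (hq : q ∈ (["DELEGATECALL", "SELFDESTRUCT", "TX.ORIGIN"] : List String))
    (hne : q.toList ≠ []) :
    (q ∈ pvScanB u (List.range u.length) ["DELEGATECALL", "SELFDESTRUCT", "TX.ORIGIN"] []) ↔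
      PySem.Chars.isIn q.toList u = true := by
  rw [pvScan_mem, ← PySem.Chars.exists_prefix_drop_iff_isIn]
  simp only [List.not_mem_nil, false_or, hq, true_and]
  constructor
  · rintro ⟨j, _, hsw⟩
    exact ⟨j, (PySem.Chars.startswith_iff _ _).mp hsw⟩
  · rintro ⟨j, hpre⟩
    by_cases hj : j < u.length
    · exact ⟨j, List.mem_range.mpr hj, (PySem.Chars.startswith_iff _ _).mpr hpre⟩
    · exfalso
      have hd : u.drop j = [] := List.drop_eq_nil_of_le (Nat.le_of_not_lt hj)
      rw [hd] at hpre
      exact hne (List.prefix_nil.mp hpre)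

-- B's inner append loop over a duplicate-free sublist of the three keys
theorem pvFoldFound (i : Int) :
    ∀ (found : List String) (a b c : List Int),
      (∀ q ∈ found, q ∈ (["DELEGATECALL", "SELFDESTRUCT", "TX.ORIGIN"] : List String)) →
      found.Nodup →
      (found.foldl (fun d' name => d'.modify name [] (· ++ [i]))
        (PySem.Dict.mk [("DELEGATECALL", a), ("SELFDESTRUCT", b), ("TX.ORIGIN", c)]))
      = PySem.Dict.mk
          [("DELEGATECALL", if "DELEGATECALL" ∈ found then a ++ [i] else a),
           ("SELFDESTRUCT", if "SELFDESTRUCT" ∈ found then b ++ [i] else b),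
           ("TX.ORIGIN", if "TX.ORIGIN" ∈ found then c ++ [i] else c)] := by
  intro found
  induction found with
  | nil => intro a b c _ _; simp
  | cons h t ih =>
      intro a b c hsub hnd
      obtain ⟨hht, hnd'⟩ := List.nodup_cons.mp hnd
      have hsub' : ∀ q ∈ t, q ∈ (["DELEGATECALL", "SELFDESTRUCT", "TX.ORIGIN"] : List String) :=
        fun q hq => hsub q (List.mem_cons_of_mem _ hq)
      have hh := hsub h List.mem_cons_self
      simp only [List.mem_cons, List.not_mem_nil, or_false] at hh
      rcases hh with rfl | rfl | rfl
      · rw [List.foldl_cons,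
          show (PySem.Dict.mk [("DELEGATECALL", a), ("SELFDESTRUCT", b), ("TX.ORIGIN", c)]).modify
              "DELEGATECALL" [] (· ++ [i])
            = PySem.Dict.mk [("DELEGATECALL", a ++ [i]), ("SELFDESTRUCT", b), ("TX.ORIGIN", c)] from rfl,
          ih (a ++ [i]) b c hsub' hnd']
        simp [List.mem_cons, hht]
      · rw [List.foldl_cons,
          show (PySem.Dict.mk [("DELEGATECALL", a), ("SELFDESTRUCT", b), ("TX.ORIGIN", c)]).modify
              "SELFDESTRUCT" [] (· ++ [i])
            = PySem.Dict.mk [("DELEGATECALL", a), ("SELFDESTRUCT", b ++ [i]), ("TX.ORIGIN", c)] from rfl,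
          ih a (b ++ [i]) c hsub' hnd']
        simp [List.mem_cons, hht]
      · rw [List.foldl_cons,
          show (PySem.Dict.mk [("DELEGATECALL", a), ("SELFDESTRUCT", b), ("TX.ORIGIN", c)]).modify
              "TX.ORIGIN" [] (· ++ [i])
            = PySem.Dict.mk [("DELEGATECALL", a), ("SELFDESTRUCT", b), ("TX.ORIGIN", c ++ [i])] from rfl,
          ih a b (c ++ [i]) hsub' hnd']
        simp [List.mem_cons, hht]

-- the invariant of B's outer loop
theorem pvLoopB (ps : List (Int × String)) :
    ∀ (a b c : List Int),
      ((ps.foldl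
        (fun d p =>
          let u := (PySem.Str.upper p.2).toList
          let found := pvScanB u (List.range u.length) ["DELEGATECALL", "SELFDESTRUCT", "TX.ORIGIN"] []
          found.foldl (fun d' name => d'.modify name [] (· ++ [p.1])) d)
        (PySem.Dict.mk [("DELEGATECALL", a), ("SELFDESTRUCT", b), ("TX.ORIGIN", c)])).items)
      = [("DELEGATECALL", a ++ pvHits "DELEGATECALL" ps),
         ("SELFDESTRUCT", b ++ pvHits "SELFDESTRUCT" ps),
         ("TX.ORIGIN", c ++ pvHits "TX.ORIGIN" ps)] := by
  induction ps with
  | nil => intro a b c; simp [pvHits]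
  | cons p ps ih =>
      intro a b c
      rw [List.foldl_cons]
      have hn : (([] : List String) ++ ["DELEGATECALL", "SELFDESTRUCT", "TX.ORIGIN"]).Nodup := by decide
      set u := (PySem.Str.upper p.2).toList with hu
      obtain ⟨hnd, hsb⟩ := pvScan_nodup_sub u (List.range u.length)
        ["DELEGATECALL", "SELFDESTRUCT", "TX.ORIGIN"] [] hn
      have hsb' : ∀ q ∈ pvScanB u (List.range u.length) ["DELEGATECALL", "SELFDESTRUCT", "TX.ORIGIN"] [],
          q ∈ (["DELEGATECALL", "SELFDESTRUCT", "TX.ORIGIN"] : List String) := by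
        intro q hq; simpa using hsb q hq
      have hD := pvFound_iff u "DELEGATECALL" (by decide) (by decide)
      have hS := pvFound_iff u "SELFDESTRUCT" (by decide) (by decide)
      have hT := pvFound_iff u "TX.ORIGIN" (by decide) (by decide)
      have hDe : PySem.Chars.isIn ("DELEGATECALL" : String).toList u = PySem.Str.isIn "DELEGATECALL" (PySem.Str.upper p.2) := by
        rw [hu]; simp [PySem.Str.isIn]
      have hSe : PySem.Chars.isIn ("SELFDESTRUCT" : String).toList u = PySem.Str.isIn "SELFDESTRUCT" (PySem.Str.upper p.2) := by
        rw [hu]; simp [PySem.Str.isIn]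
      have hTe : PySem.Chars.isIn ("TX.ORIGIN" : String).toList u = PySem.Str.isIn "TX.ORIGIN" (PySem.Str.upper p.2) := by
        rw [hu]; simp [PySem.Str.isIn]
      simp only []
      rw [pvFoldFound p.1 _ a b c hsb' hnd, ih]
      have eD : ("DELEGATECALL" ∈ pvScanB u (List.range u.length) ["DELEGATECALL", "SELFDESTRUCT", "TX.ORIGIN"] [])
          ↔ PySem.Str.isIn "DELEGATECALL" (PySem.Str.upper p.2) = true := by rw [hD, hDe]
      have eS : ("SELFDESTRUCT" ∈ pvScanB u (List.range u.length) ["DELEGATECALL", "SELFDESTRUCT", "TX.ORIGIN"] [])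
          ↔ PySem.Str.isIn "SELFDESTRUCT" (PySem.Str.upper p.2) = true := by rw [hS, hSe]
      have eT : ("TX.ORIGIN" ∈ pvScanB u (List.range u.length) ["DELEGATECALL", "SELFDESTRUCT", "TX.ORIGIN"] [])
          ↔ PySem.Str.isIn "TX.ORIGIN" (PySem.Str.upper p.2) = true := by rw [hT, hTe]
      rcases Bool.eq_false_or_eq_true (PySem.Str.isIn "DELEGATECALL" (PySem.Str.upper p.2)) with h1 | h1 <;>
      rcases Bool.eq_false_or_eq_true (PySem.Str.isIn "SELFDESTRUCT" (PySem.Str.upper p.2)) with h2 | h2 <;>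
      rcases Bool.eq_false_or_eq_true (PySem.Str.isIn "TX.ORIGIN" (PySem.Str.upper p.2)) with h3 | h3 <;>
        simp only [pvHits, List.filterMap_cons, h1, h2, h3, eD, eS, eT, if_pos,
          Bool.false_eq_true] <;>
        simp [List.append_assoc]

-- ===== VERDICT (by name: the statement is the Claim_ definition above) =====
theorem detect_dangerous_opcodes_spec : Claim_equal_detect_dangerous_opcodes := by
  intro instructions _
  unfold Spec_detect_dangerous_opcodes detect_dangerous_opcodes detect_dangerous_opcodes_alt
  have eA : (PySem.Dict.ofList [("DELEGATECALL", ([] : List Int)), ("SELFDESTRUCT", []), ("TX.ORIGIN", [])])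
      = PySem.Dict.mk [("DELEGATECALL", []), ("SELFDESTRUCT", []), ("TX.ORIGIN", [])] := rfl
  have eB : (PySem.Dict.ofList ((["DELEGATECALL", "SELFDESTRUCT", "TX.ORIGIN"] : List String).map (fun n => (n, ([] : List Int)))))
      = PySem.Dict.mk [("DELEGATECALL", []), ("SELFDESTRUCT", []), ("TX.ORIGIN", [])] := rfl
  simp only [eA, eB, pvLoopA (PySem.List.enumerate instructions 0) [] [] [],
    pvLoopB (PySem.List.enumerate instructions 0) [] [] []]
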